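-- pv_equiv track=rewrite | github.com/deefifofun/prints_charming | prints_charming/prints_charming.py | get_words_and_spaces
-- ===== SOURCE A (Python) =====
-- from typing import Any, Callable, Dict, List, Optional, Tuple, Union
--
-- def get_words_and_spaces(text: str) -> List[str]:
--     """
--     Splits text into a list of words and spaces.
--
--     :param text: The input text.
--     :return: A list of words and spaces in order of appearance.
--     """
--     words = text.split()
--     words_and_spaces = []
--     index = 0
--     for word in words:
--         start = text.find(word, index)
--         if start > index:
--             words_and_spaces.append(text[index:start])
--         words_and_spaces.append(word)
--         index = start + len(word)
--     if index < len(text):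
--         words_and_spaces.append(text[index:])
--     return words_and_spaces
-- ===== SOURCE B (Python) =====
-- def get_words_and_spaces(text):
--     """Single pass: group consecutive characters by whitespace status."""
--     result = []
--     run = ""
--     for ch in text:
--         if run and ch.isspace() != run[0].isspace():
--             result.append(run)
--             run = ""
--         run += ch
--     if run:
--         result.append(run)
--     return result
-- ===== Notes on version B (the rewrite author's own statement) =====
-- stated objective: simpler
-- what changed: Replaced split()+find()+slice index arithmetic with a single left-to-right pass that accumulates a run and flushes it whenever the character's whitespace status changes.
import Mathlib
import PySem

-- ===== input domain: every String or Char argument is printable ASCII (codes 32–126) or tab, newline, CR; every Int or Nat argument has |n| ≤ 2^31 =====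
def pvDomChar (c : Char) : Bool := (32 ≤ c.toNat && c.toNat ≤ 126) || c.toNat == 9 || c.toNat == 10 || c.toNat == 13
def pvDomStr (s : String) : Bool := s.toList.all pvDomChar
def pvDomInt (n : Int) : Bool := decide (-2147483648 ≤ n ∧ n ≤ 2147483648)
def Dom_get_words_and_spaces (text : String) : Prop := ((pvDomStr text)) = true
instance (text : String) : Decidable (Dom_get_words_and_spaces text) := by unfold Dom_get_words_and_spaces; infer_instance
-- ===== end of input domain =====

-- B replaces A's split()/find()/slice index arithmetic with one left-to-right pass that
-- groups consecutive characters of equal whitespace status (objective: simpler).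

-- ===== PORT A =====
-- A's loop over `words = text.split()`, keeping `index` and using text.find(word, index)
-- and slices text[index:start] / text[index:], transliterated over text.toList.
def pvGoA (s : List Char) (acc : List (List Char)) (index : Int) :
    List (List Char) → List (List Char)
  | [] =>
      -- if index < len(text): append text[index:]
      if index < (s.length : Int) then acc ++ [PySem.Chars.slice s (some index) none] else acc
  | w :: ws =>
      -- start = text.find(word, index)
      let start := PySem.Chars.findFrom s w index
      -- if start > index: append text[index:start]
      let acc' := if start > index then acc ++ [PySem.Chars.slice s (some index) (some start)] else acc
      -- append word; index = start + len(word)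
      pvGoA s (acc' ++ [w]) (start + (w.length : Int)) ws

def get_words_and_spaces (text : String) : List String :=
  (pvGoA text.toList [] 0 (PySem.Chars.split₀ text.toList)).map (fun l => String.ofList l)

-- ===== PORT B =====
-- B's single pass: flush the pending run whenever the whitespace status changes.
def pvGoB (acc : List (List Char)) (run : List Char) : List Char → List (List Char)
  | [] => match run with
          | [] => acc
          | _ => acc ++ [run]
  | c :: cs =>
      match run with
      | [] => pvGoB acc [c] cs
      | r0 :: _ =>
          if PySem.Chars.isspace c ≠ PySem.Chars.isspace r0 then
            pvGoB (acc ++ [run]) [c] cs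
          else
            pvGoB acc (run ++ [c]) cs

def get_words_and_spaces_alt (text : String) : List String :=
  (pvGoB [] [] text.toList).map (fun l => String.ofList l)

-- ===== PRECONDITION & SPEC =====
def Spec_get_words_and_spaces (text : String) (out : List String) : Prop := out = get_words_and_spaces_alt text
instance (text : String) (out : List String) : Decidable (Spec_get_words_and_spaces text out) := by unfold Spec_get_words_and_spaces; infer_instance

-- ===== CLAIM (what is proved, stated in full; the proofs are below) =====
def Claim_equal_get_words_and_spaces : Prop := ∀ (text : String), Dom_get_words_and_spaces text → Spec_get_words_and_spaces text (get_words_and_spaces text)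

-- ===== LEMMAS AND PROOFS =====

-- canonical grouping of a string into maximal runs of equal whitespace status
def pvGrp : List Char → List (List Char)
  | [] => []
  | [c] => [[c]]
  | c :: d :: rest =>
      match pvGrp (d :: rest) with
      | g :: gs => if PySem.Chars.isspace c = PySem.Chars.isspace d then (c :: g) :: gs else [c] :: g :: gs
      | [] => [[c]]

theorem pvGrp_nil : pvGrp [] = [] := rfl

theorem pvGrp_cons₂ (c d : Char) (rest : List Char) :
    pvGrp (c :: d :: rest) = (match pvGrp (d :: rest) with
      | g :: gs => if PySem.Chars.isspace c = PySem.Chars.isspace d then (c :: g) :: gs else [c] :: g :: gs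
      | [] => [[c]]) := rfl

theorem pvGrp_ne_nil (c : Char) (l : List Char) : pvGrp (c :: l) ≠ [] := by
  cases l with
  | nil => simp [pvGrp]
  | cons d rest =>
    rcases h : pvGrp (d :: rest) with _ | ⟨g, gs⟩
    · rw [pvGrp_cons₂, h]; simp
    · rw [pvGrp_cons₂, h]; by_cases hsd : PySem.Chars.isspace c = PySem.Chars.isspace d <;> simp [hsd]

-- a nonempty uniform run followed by nothing or a status change is one group
theorem pvGrp_append_uniform (u rest : List Char) (b : Bool)
    (hne : u ≠ []) (hu : ∀ x ∈ u, PySem.Chars.isspace x = b)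
    (hrest : rest = [] ∨ ∃ c cs, rest = c :: cs ∧ PySem.Chars.isspace c ≠ b) :
    pvGrp (u ++ rest) = u :: pvGrp rest := by
  induction u with
  | nil => simp at hne
  | cons a u ih =>
    cases u with
    | nil =>
      rcases hrest with h | ⟨c, cs, rfl, hc⟩
      · simp [h, pvGrp]
      · have ha := hu a (by simp)
        simp only [List.cons_append, List.nil_append]
        rw [pvGrp_cons₂]
        rcases h : pvGrp (c :: cs) with _ | ⟨g, gs⟩
        · exact absurd h (pvGrp_ne_nil c cs)
        · have : ¬ (PySem.Chars.isspace a = PySem.Chars.isspace c) := by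
            rw [ha]; intro hh; exact hc hh.symm
          simp [this]
    | cons a2 u2 =>
      have step := ih (by simp) (fun x hx => hu x (List.mem_cons_of_mem a hx))
      simp only [List.cons_append] at step ⊢
      rw [pvGrp_cons₂, step]
      have ha := hu a (by simp); have ha2 := hu a2 (by simp)
      rw [ha, ha2]; simp

-- ===== B computes pvGrp =====
theorem pvGoB_run (l : List Char) : ∀ (acc : List (List Char)) (run : List Char) (b : Bool),
    run ≠ [] → (∀ x ∈ run, PySem.Chars.isspace x = b) →
    pvGoB acc run l = acc ++ pvGrp (run ++ l) := by
  induction l with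
  | nil =>
    intro acc run b hne hu
    rw [pvGrp_append_uniform run [] b hne hu (Or.inl rfl), pvGrp_nil]
    cases run with
    | nil => simp at hne
    | cons r rs => simp [pvGoB]
  | cons c cs ih =>
    intro acc run b hne hu
    cases run with
    | nil => simp at hne
    | cons r0 rs =>
      have hr0 := hu r0 (by simp)
      by_cases hc : PySem.Chars.isspace c = b
      · have : ¬ (PySem.Chars.isspace c ≠ PySem.Chars.isspace r0) := by rw [hr0, hc]; simp
        rw [show pvGoB acc (r0 :: rs) (c :: cs) = pvGoB acc ((r0 :: rs) ++ [c]) cs by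
              simp [pvGoB, this]]
        rw [ih acc ((r0 :: rs) ++ [c]) b (by simp)
              (by intro x hx; rcases List.mem_append.mp hx with h | h
                  · exact hu x h
                  · simp at h; rw [h, hc])]
        simp
      · have hne2 : PySem.Chars.isspace c ≠ PySem.Chars.isspace r0 := by rw [hr0]; exact hc
        rw [show pvGoB acc (r0 :: rs) (c :: cs) = pvGoB (acc ++ [r0 :: rs]) [c] cs by
              simp [pvGoB, hne2]]
        rw [ih (acc ++ [r0 :: rs]) [c] (PySem.Chars.isspace c) (by simp) (by simp)]
        rw [pvGrp_append_uniform (r0 :: rs) (c :: cs) b hne hu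
              (Or.inr ⟨c, cs, rfl, hc⟩)]
        simp

theorem pvGoB_eq_pvGrp (l : List Char) : pvGoB [] [] l = pvGrp l := by
  cases l with
  | nil => simp [pvGoB, pvGrp_nil]
  | cons c cs =>
    rw [show pvGoB [] [] (c :: cs) = pvGoB [] [c] cs from rfl]
    rw [pvGoB_run cs [] [c] (PySem.Chars.isspace c) (by simp) (by simp)]
    simp

-- ===== split₀ facts =====
theorem pvSplitGo_acc (l : List Char) : ∀ (cur : List Char) (acc : List (List Char)),
    PySem.Chars.split₀.go l cur acc = acc.reverse ++ PySem.Chars.split₀.go l cur [] := by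
  induction l with
  | nil =>
    intro cur acc
    cases cur <;> simp [PySem.Chars.split₀.go]
  | cons c rest ih =>
    intro cur acc
    rw [PySem.Chars.split₀.go, PySem.Chars.split₀.go]
    by_cases hc : PySem.Chars.isspace c
    · cases cur with
      | nil =>
        simp only [hc, if_true, List.isEmpty_nil]
        exact ih [] acc
      | cons x xs =>
        simp only [hc, if_true, List.isEmpty_cons, Bool.false_eq_true, if_false]
        rw [ih [] ((x::xs).reverse :: acc), ih [] [(x::xs).reverse]]
        simp
    · simp only [hc]
      exact ih (c :: cur) acc

theorem pvSplitGo_space (u : List Char) (hu : ∀ x ∈ u, PySem.Chars.isspace x = true) :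
    ∀ (rest : List Char) (acc : List (List Char)),
    PySem.Chars.split₀.go (u ++ rest) [] acc = PySem.Chars.split₀.go rest [] acc := by
  induction u with
  | nil => intro rest acc; rfl
  | cons a u ih =>
    intro rest acc
    have ha := hu a (by simp)
    rw [List.cons_append, PySem.Chars.split₀.go]
    simp only [ha, if_true, List.isEmpty_nil]
    exact ih (fun x hx => hu x (List.mem_cons_of_mem a hx)) rest acc

theorem pvSplitGo_word (w : List Char) (hw : ∀ x ∈ w, PySem.Chars.isspace x = false) :
    ∀ (r : List Char) (cur : List Char) (acc : List (List Char)),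
    PySem.Chars.split₀.go (w ++ r) cur acc = PySem.Chars.split₀.go r (w.reverse ++ cur) acc := by
  induction w with
  | nil => intro r cur acc; rfl
  | cons a w ih =>
    intro r cur acc
    have ha := hw a (by simp)
    rw [List.cons_append, PySem.Chars.split₀.go]
    simp only [ha, Bool.false_eq_true, if_false]
    rw [ih (fun x hx => hw x (List.mem_cons_of_mem a hx)) r (a :: cur) acc]
    simp

theorem pvSplitGo_flush (r : List Char) (cur : List Char) (acc : List (List Char))
    (hcur : cur ≠ []) (hr : r = [] ∨ ∃ c cs, r = c :: cs ∧ PySem.Chars.isspace c = true) :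
    PySem.Chars.split₀.go r cur acc = acc.reverse ++ cur.reverse :: PySem.Chars.split₀ r := by
  rcases hr with rfl | ⟨c, cs, rfl, hc⟩
  · cases cur with
    | nil => simp at hcur
    | cons x xs => simp [PySem.Chars.split₀.go, PySem.Chars.split₀]
  · rw [PySem.Chars.split₀.go]
    cases cur with
    | nil => simp at hcur
    | cons x xs =>
      simp only [hc, if_true, List.isEmpty_cons, Bool.false_eq_true, if_false]
      rw [pvSplitGo_acc cs [] ((x::xs).reverse :: acc)]
      have : PySem.Chars.split₀ (c :: cs) = PySem.Chars.split₀.go cs [] [] := by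
        rw [PySem.Chars.split₀, PySem.Chars.split₀.go]
        simp [hc]
      rw [this]
      simp

-- first-word decomposition of split₀
theorem pvSplit₀_decomp (u w r : List Char)
    (hu : ∀ x ∈ u, PySem.Chars.isspace x = true)
    (hwne : w ≠ []) (hw : ∀ x ∈ w, PySem.Chars.isspace x = false)
    (hr : r = [] ∨ ∃ c cs, r = c :: cs ∧ PySem.Chars.isspace c = true) :
    PySem.Chars.split₀ (u ++ w ++ r) = w :: PySem.Chars.split₀ r := by
  rw [PySem.Chars.split₀, List.append_assoc, pvSplitGo_space u hu (w ++ r) [],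
      pvSplitGo_word w hw r [] [], List.append_nil,
      pvSplitGo_flush r w.reverse [] (by simpa) hr]
  simp

theorem pvSplit₀_nil_all_space (t : List Char) (h : PySem.Chars.split₀ t = []) :
    ∀ x ∈ t, PySem.Chars.isspace x = true := by
  induction t with
  | nil => simp
  | cons c cs ih =>
    by_cases hc : PySem.Chars.isspace c
    · intro x hx
      rcases List.mem_cons.mp hx with rfl | hx'
      · exact hc
      · refine ih ?_ x hx'
        rw [PySem.Chars.split₀] at h ⊢
        rw [PySem.Chars.split₀.go] at h
        simpa [hc] using h
    · exfalso
      rw [PySem.Chars.split₀, PySem.Chars.split₀.go] at h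
      simp only [hc, Bool.false_eq_true, if_false] at h
      have hne : ∀ (l cur : List Char) (acc : List (List Char)), cur ≠ [] ∨ acc ≠ [] →
          PySem.Chars.split₀.go l cur acc ≠ [] := by
        intro l
        induction l with
        | nil =>
          intro cur acc hca
          cases cur with
          | nil =>
            rcases hca with h' | h'
            · simp at h'
            · simpa [PySem.Chars.split₀.go] using h'
          | cons x xs => simp [PySem.Chars.split₀.go]
        | cons d ds ihl =>
          intro cur acc hca
          rw [PySem.Chars.split₀.go]
          by_cases hd : PySem.Chars.isspace d
          · cases cur with
            | nil =>
              simp only [hd, if_true, List.isEmpty_nil]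
              refine ihl [] acc (Or.inr ?_)
              rcases hca with h' | h'
              · simp at h'
              · exact h'
            | cons x xs =>
              simp only [hd, if_true, List.isEmpty_cons, Bool.false_eq_true, if_false]
              exact ihl [] ((x::xs).reverse :: acc) (Or.inr (by simp))
          · simp only [hd, Bool.false_eq_true, if_false]
            exact ihl (d :: cur) acc (Or.inl (by simp))
      exact hne cs [c] [] (Or.inl (by simp)) h

-- text.find(word, index) finds the word right after its leading whitespace
theorem pvFind_eq (u w r : List Char)
    (hu : ∀ x ∈ u, PySem.Chars.isspace x = true)
    (hwne : w ≠ []) (hw : ∀ x ∈ w, PySem.Chars.isspace x = false) :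
    PySem.Chars.find (u ++ w ++ r) w = (u.length : Int) := by
  set t := u ++ w ++ r with ht
  have hdrop : t.drop u.length = w ++ r := by
    rw [ht, List.append_assoc, List.drop_append_of_le_length (le_refl u.length)]
    simp
  have hocc : w <+: t.drop u.length := by rw [hdrop]; exact ⟨r, rfl⟩
  have hbefore : ∀ i < u.length, ¬ w <+: t.drop i := by
    intro i hi hpre
    cases w with
    | nil => exact hwne rfl
    | cons w0 ws =>
      have hw0 : PySem.Chars.isspace w0 = false := hw w0 (by simp)
      have hhead : (t.drop i).head? = some w0 := by
        rcases hpre with ⟨s', hs'⟩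
        rw [← hs']; simp
      rw [List.head?_drop] at hhead
      have hui : t[i]? = some u[i] := by
        rw [ht, List.append_assoc, List.getElem?_append_left hi, List.getElem?_eq_getElem hi]
      rw [hui] at hhead
      have hsp : PySem.Chars.isspace u[i] = true := hu u[i] (List.getElem_mem hi)
      rw [show u[i] = w0 by injection hhead, hw0] at hsp
      exact absurd hsp (by simp)
  have hinfix : w <:+: t := ⟨u, r, by rw [ht]⟩
  have hnn : 0 ≤ PySem.Chars.find t w := (PySem.Chars.find_nonneg_iff t w).mpr hinfix
  obtain ⟨hat, hmin⟩ := PySem.Chars.find_spec hnn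
  have : (PySem.Chars.find t w).toNat = u.length := by
    rcases lt_trichotomy (PySem.Chars.find t w).toNat u.length with h | h | h
    · exact absurd hat (hbefore _ h)
    · exact h
    · exact absurd hocc (hmin _ h)
  omega

theorem pvDropWhile_head_false {p : Char → Bool} {l : List Char} {c : Char} {cs : List Char}
    (h : l.dropWhile p = c :: cs) : p c = false := by
  have hne : l.dropWhile p ≠ [] := by rw [h]; simp
  have h2 := List.head_dropWhile_not p hne
  have h3 : (l.dropWhile p).head hne = c := by simp [h]
  rw [h3] at h2; exact h2

-- ===== A computes pvGrp =====
theorem pvGoA_main (n : Nat) : ∀ (t s : List Char) (k : Nat) (acc : List (List Char)),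
    t.length ≤ n → s.drop k = t → k ≤ s.length →
    pvGoA s acc (k : Int) (PySem.Chars.split₀ t) = acc ++ pvGrp t := by
  induction n with
  | zero =>
    intro t s k acc hlen hdrop hk
    have ht : t = [] := List.eq_nil_of_length_eq_zero (Nat.le_zero.mp hlen)
    subst ht
    have : PySem.Chars.split₀ ([] : List Char) = [] := rfl
    rw [this, pvGoA, pvGrp_nil]
    have hks : s.length ≤ k := by
      have := congrArg List.length hdrop
      simp at this
      omega
    rw [if_neg (by exact_mod_cast Nat.not_lt.mpr hks)]
    simp
  | succ n ih =>
    intro t s k acc hlen hdrop hk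
    rcases hsp : PySem.Chars.split₀ t with _ | ⟨w, ws⟩
    · -- no words: t is pure whitespace (or empty)
      have hall := pvSplit₀_nil_all_space t hsp
      rw [pvGoA]
      cases t with
      | nil =>
        have hks : s.length ≤ k := by
          have := congrArg List.length hdrop; simp at this; omega
        rw [if_neg (by exact_mod_cast Nat.not_lt.mpr hks), pvGrp_nil]
        simp
      | cons c cs =>
        have hlt : k < s.length := by
          have := congrArg List.length hdrop; simp at this; omega
        rw [if_pos (by exact_mod_cast hlt)]
        rw [PySem.Chars.slice_eq_listSlice, PySem.List.slice_from_natCast, hdrop]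
        rw [show pvGrp (c :: cs) = [c :: cs] by
          have := pvGrp_append_uniform (c :: cs) [] true (by simp) hall (Or.inl rfl)
          simpa [pvGrp_nil] using this]
    · -- t = u ++ w ++ r : leading whitespace, first word, rest
      set u := t.takeWhile PySem.Chars.isspace with hu_def
      set t' := t.dropWhile PySem.Chars.isspace with ht'_def
      have htu : u ++ t' = t := List.takeWhile_append_dropWhile
      have hu : ∀ x ∈ u, PySem.Chars.isspace x = true := fun x hx => List.mem_takeWhile_imp hx
      have ht'ne : t' ≠ [] := by
        intro h0
        rw [h0, List.append_nil] at htu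
        have : PySem.Chars.split₀ t = [] := by
          have h2 := pvSplitGo_space u hu [] []
          rw [List.append_nil] at h2
          rw [← htu, PySem.Chars.split₀, h2]
          rfl
        rw [this] at hsp; cases hsp
      set w' := t'.takeWhile (fun x => !PySem.Chars.isspace x) with hw'_def
      set r := t'.dropWhile (fun x => !PySem.Chars.isspace x) with hr_def
      have htw : w' ++ r = t' := List.takeWhile_append_dropWhile
      have hw : ∀ x ∈ w', PySem.Chars.isspace x = false := by
        intro x hx
        have := List.mem_takeWhile_imp hx
        simpa using this
      have hw'ne : w' ≠ [] := by
        cases h' : t' with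
        | nil => exact absurd h' ht'ne
        | cons c cs =>
          have hc : PySem.Chars.isspace c = false := pvDropWhile_head_false (ht'_def ▸ h')
          rw [hw'_def, h', List.takeWhile_cons, hc]
          simp
      have hr : r = [] ∨ ∃ c cs, r = c :: cs ∧ PySem.Chars.isspace c = true := by
        cases h' : r with
        | nil => exact Or.inl rfl
        | cons c cs =>
          refine Or.inr ⟨c, cs, rfl, ?_⟩
          have := pvDropWhile_head_false (hr_def ▸ h')
          simpa using this
      have hdecomp : t = u ++ w' ++ r := by rw [List.append_assoc, htw, htu]
      have hsp2 : PySem.Chars.split₀ t = w' :: PySem.Chars.split₀ r := by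
        rw [hdecomp]; exact pvSplit₀_decomp u w' r hu hw'ne hw hr
      rw [hsp] at hsp2
      obtain ⟨hww, hws⟩ : w = w' ∧ ws = PySem.Chars.split₀ r := ⟨by injection hsp2, by injection hsp2⟩
      rw [← hww] at hw hw'ne hdecomp
      rw [pvGoA]
      have hfind : PySem.Chars.find (s.drop k) w = (u.length : Int) := by
        rw [hdrop, hdecomp]; exact pvFind_eq u w r hu hw'ne hw
      have hstart : PySem.Chars.findFrom s w (k : Int) = ((k + u.length : Nat) : Int) := by
        rw [PySem.Chars.findFrom_natCast s w k hk, hfind]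
        have : ((u.length : Int)) ≠ -1 := by omega
        rw [if_neg (by exact_mod_cast this)]
        push_cast; ring
      simp only [hstart]
      have hslice : PySem.Chars.slice s (some (k : Int)) (some ((k + u.length : Nat) : Int)) = u := by
        rw [PySem.Chars.slice_eq_listSlice, PySem.List.slice_natCast]
        rw [hdrop, Nat.add_sub_cancel_left, hdecomp, List.append_assoc]
        exact List.take_left
      have hrdrop : s.drop (k + u.length + w.length) = r := by
        rw [← List.drop_drop, ← List.drop_drop, hdrop, hdecomp, List.append_assoc, List.drop_left,
            List.drop_left]
      have hrk : k + u.length + w.length ≤ s.length := by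
        have h1 := congrArg List.length hdrop
        have h2 := congrArg List.length hdecomp
        simp at h1 h2
        omega
      have hrlen : r.length ≤ n := by
        have h2 := congrArg List.length hdecomp
        have hwpos : 0 < w.length := List.length_pos_iff.mpr hw'ne
        simp at h2
        omega
      have hindex : ((k + u.length : Nat) : Int) + (w.length : Int) = ((k + u.length + w.length : Nat) : Int) := by push_cast; ring
      rw [hindex, hws, ih r s (k + u.length + w.length) _ hrlen hrdrop hrk]
      have hgrp_wr : pvGrp (w ++ r) = w :: pvGrp r :=
        pvGrp_append_uniform w r false hw'ne hw
          (by rcases hr with h' | ⟨c, cs, h', hc⟩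
              · exact Or.inl h'
              · exact Or.inr ⟨c, cs, h', by simp [hc]⟩)
      by_cases hune : u = []
      · rw [if_neg (by simp [hune])]
        rw [hdecomp, hune, List.nil_append, hgrp_wr]
        simp
      · have hupos : 0 < u.length := List.length_pos_iff.mpr hune
        rw [if_pos (by exact_mod_cast Nat.lt_add_of_pos_right hupos), hslice]
        have hwhead : ∃ c cs, w ++ r = c :: cs ∧ PySem.Chars.isspace c ≠ true := by
          cases w with
          | nil => exact absurd rfl hw'ne
          | cons c cs => exact ⟨c, cs ++ r, rfl, by simp [hw c (by simp)]⟩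
        rw [hdecomp, show u ++ w ++ r = u ++ (w ++ r) from List.append_assoc u w r,
            pvGrp_append_uniform u (w ++ r) true hune hu (Or.inr hwhead), hgrp_wr]
        simp

-- ===== VERDICT (by name: the statement is the Claim_ definition above) =====
theorem get_words_and_spaces_spec : Claim_equal_get_words_and_spaces := by
  intro text _
  show _ = _
  unfold get_words_and_spaces get_words_and_spaces_alt
  rw [pvGoB_eq_pvGrp, show (0 : Int) = ((0 : Nat) : Int) from rfl,
    pvGoA_main text.toList.length text.toList text.toList 0 [] le_rfl rfl (Nat.zero_le _)]
  simp
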